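-- pv_equiv track=rewrite | github.com/AtharvaNarale-code/SmartHireAI | Backend/extraction.py | generate_analysis_metrics
-- ===== SOURCE A (Python) =====
-- from typing import Dict
--
-- def generate_analysis_metrics(extracted_skills: Dict) -> Dict:
--     return {
--         "total_strong_skills": sum(
--             1 for sl in extracted_skills.values()
--             for s in sl if s.get("confidence") == "strong"
--         ),
--         "total_medium_skills": sum(
--             1 for sl in extracted_skills.values()
--             for s in sl if s.get("confidence") == "medium"
--         ),
--         "total_weak_skills": sum(
--             1 for sl in extracted_skills.values()
--             for s in sl if s.get("confidence") == "weak"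
--         ),
--     }
-- ===== SOURCE B (Python) =====
-- def generate_analysis_metrics(extracted_skills):
--     strong, medium, weak = 0, 0, 0
--     confidences = [s.get("confidence") for sl in extracted_skills.values() for s in sl]
--     for c in confidences:
--         if c == "strong":
--             strong += 1
--         elif c == "medium":
--             medium += 1
--         elif c == "weak":
--             weak += 1
--     return {
--         "total_strong_skills": strong,
--         "total_medium_skills": medium,
--         "total_weak_skills": weak,
--     }
-- ===== Notes on version B (the rewrite author's own statement) =====
-- stated objective: alternative
-- what changed: Flattens all confidences once and makes a single pass with three integer accumulators, instead of three separate generator scans of the whole nested structure.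
import Mathlib
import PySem

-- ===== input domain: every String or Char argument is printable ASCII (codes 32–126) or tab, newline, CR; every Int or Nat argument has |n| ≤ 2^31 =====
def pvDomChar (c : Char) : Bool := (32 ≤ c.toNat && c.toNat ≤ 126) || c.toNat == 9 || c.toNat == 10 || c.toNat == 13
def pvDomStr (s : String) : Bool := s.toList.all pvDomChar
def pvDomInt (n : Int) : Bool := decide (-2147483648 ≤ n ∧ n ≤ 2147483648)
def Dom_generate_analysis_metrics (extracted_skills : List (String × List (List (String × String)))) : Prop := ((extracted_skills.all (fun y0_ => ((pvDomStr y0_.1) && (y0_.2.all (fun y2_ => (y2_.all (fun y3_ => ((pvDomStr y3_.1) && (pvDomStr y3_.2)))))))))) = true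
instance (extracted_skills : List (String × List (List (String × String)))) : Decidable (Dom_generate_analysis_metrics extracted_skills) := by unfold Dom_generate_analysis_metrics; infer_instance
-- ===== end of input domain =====

-- B flattens the confidences once and counts strong/medium/weak in a single pass with three accumulators (objective: alternative one-pass algorithm, same cost).


-- ===== PORT A =====
-- s.get("confidence") on the inner dict (first match, Python dict lookup)
def gamConf (s : List (String × String)) : Option String :=
  (PySem.Dict.mk s).get? "confidence"

-- sum(1 for sl in extracted_skills.values() for s in sl if s.get("confidence") == c)
def gamSum (extracted_skills : List (String × List (List (String × String)))) (c : String) : Int :=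
  extracted_skills.foldl
    (fun acc p => p.2.foldl (fun a s => if gamConf s == some c then a + 1 else a) acc) 0

def generate_analysis_metrics (extracted_skills : List (String × List (List (String × String)))) : List (String × Int) :=
  [("total_strong_skills", gamSum extracted_skills "strong"),
   ("total_medium_skills", gamSum extracted_skills "medium"),
   ("total_weak_skills", gamSum extracted_skills "weak")]

-- ===== PORT B =====
-- [s.get("confidence") for sl in extracted_skills.values() for s in sl]
def gamConfs (extracted_skills : List (String × List (List (String × String)))) : List (Option String) :=
  extracted_skills.flatMap (fun p => p.2.map gamConf)

-- one pass over the flat list, three accumulators (strong, medium, weak)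
def gamTally (cs : List (Option String)) : Int × Int × Int :=
  cs.foldl
    (fun t c =>
      if c == some "strong" then (t.1 + 1, t.2.1, t.2.2)
      else if c == some "medium" then (t.1, t.2.1 + 1, t.2.2)
      else if c == some "weak" then (t.1, t.2.1, t.2.2 + 1)
      else t)
    (0, 0, 0)

def generate_analysis_metrics_alt (extracted_skills : List (String × List (List (String × String)))) : List (String × Int) :=
  let t := gamTally (gamConfs extracted_skills)
  [("total_strong_skills", t.1),
   ("total_medium_skills", t.2.1),
   ("total_weak_skills", t.2.2)]

-- ===== PRECONDITION & SPEC =====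
def Spec_generate_analysis_metrics (extracted_skills : List (String × List (List (String × String)))) (out : List (String × Int)) : Prop := out = generate_analysis_metrics_alt extracted_skills
instance (extracted_skills : List (String × List (List (String × String)))) (out : List (String × Int)) : Decidable (Spec_generate_analysis_metrics extracted_skills out) := by unfold Spec_generate_analysis_metrics; infer_instance

-- ===== CLAIM (what is proved, stated in full; the proofs are below) =====
def Claim_equal_generate_analysis_metrics : Prop := ∀ (extracted_skills : List (String × List (List (String × String)))), Dom_generate_analysis_metrics extracted_skills → Spec_generate_analysis_metrics extracted_skills (generate_analysis_metrics extracted_skills)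

-- ===== LEMMAS AND PROOFS =====

-- A's generator sum for key c is the count of (some c) among all confidences
theorem gamSum_foldl (es : List (String × List (List (String × String)))) (c : String) (a : Int) :
    es.foldl (fun acc p => p.2.foldl (fun a s => if gamConf s == some c then a + 1 else a) acc) a
      = a + ((gamConfs es).count (some c) : Int) := by
  induction es generalizing a with
  | nil => simp [gamConfs]
  | cons p t ih =>
    rw [List.foldl_cons, ih]
    simp only [gamConfs, List.flatMap_cons, List.count_append]
    rw [
      ← List.foldl_map (f := gamConf) (g := fun (a : Int) x => if x == some c then a + 1 else a),
      PySem.List.foldl_beq_add_one]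
    push_cast
    ring

theorem gamSum_eq_count (es : List (String × List (List (String × String)))) (c : String) :
    gamSum es c = ((gamConfs es).count (some c) : Int) := by
  unfold gamSum
  rw [gamSum_foldl]
  ring

-- each component of B's triple counts its key
theorem gamTally_foldl (cs : List (Option String)) (t : Int × Int × Int) :
    cs.foldl
      (fun t c =>
        if c == some "strong" then (t.1 + 1, t.2.1, t.2.2)
        else if c == some "medium" then (t.1, t.2.1 + 1, t.2.2)
        else if c == some "weak" then (t.1, t.2.1, t.2.2 + 1)
        else t)
      t
      = (t.1 + (cs.count (some "strong") : Int),
         t.2.1 + (cs.count (some "medium") : Int),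
         t.2.2 + (cs.count (some "weak") : Int)) := by
  induction cs generalizing t with
  | nil => simp
  | cons c cs ih =>
    rw [List.foldl_cons, ih]
    by_cases hs : c = some "strong" <;> by_cases hm : c = some "medium" <;>
      by_cases hw : c = some "weak" <;>
      simp_all [Prod.ext_iff] <;> omega

theorem gamTally_eq (cs : List (Option String)) :
    gamTally cs = ((cs.count (some "strong") : Int),
                   (cs.count (some "medium") : Int),
                   (cs.count (some "weak") : Int)) := by
  unfold gamTally
  rw [gamTally_foldl]
  simp

-- ===== VERDICT (by name: the statement is the Claim_ definition above) =====
theorem generate_analysis_metrics_spec : Claim_equal_generate_analysis_metrics := by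
  intro es _
  show generate_analysis_metrics es = generate_analysis_metrics_alt es
  simp only [generate_analysis_metrics, generate_analysis_metrics_alt,
    gamSum_eq_count, gamTally_eq]
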